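-- pv_equiv track=rewrite | github.com/Kennytsu/tactoairpods | TechEuropeMunich/mcp_host/tools/summarize_negotiation_transcript.py | _parse_text_transcript
-- ===== SOURCE A (Python) =====
-- from typing import Dict, Any, List, Optional
--
-- def _parse_text_transcript(content: str) -> List[Dict[str, str]]:
--     """Parse plain text transcript into structured format"""
--     lines = content.strip().split('\n')
--     transcript = []
--
--     current_role = None
--     current_message = []
--
--     for line in lines:
--         line = line.strip()
--         if not line:
--             continue
--
--         # Check for role indicators
--         if line.lower().startswith(('buyer:', 'user:', 'customer:')):
--             if current_role and current_message:
--                 transcript.append({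
--                     "role": current_role,
--                     "message": ' '.join(current_message)
--                 })
--             current_role = "buyer"
--             current_message = [line.split(':', 1)[1].strip()]
--         elif line.lower().startswith(('supplier:', 'seller:', 'vendor:')):
--             if current_role and current_message:
--                 transcript.append({
--                     "role": current_role,
--                     "message": ' '.join(current_message)
--                 })
--             current_role = "supplier"
--             current_message = [line.split(':', 1)[1].strip()]
--         else:
--             if current_message:
--                 current_message.append(line)
--             else:
--                 # Default to buyer if no role specified
--                 current_role = "buyer"
--                 current_message = [line]
--
--     # Add the last message
--     if current_role and current_message:
--         transcript.append({
--             "role": current_role,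
--             "message": ' '.join(current_message)
--         })
--
--     return transcript
-- ===== SOURCE B (Python) =====
-- def _parse_text_transcript(content):
--     """Two-pass: tokenize lines into (role|None, text), then fold tokens into entries."""
--     BUYER = ('buyer:', 'user:', 'customer:')
--     SUPPLIER = ('supplier:', 'seller:', 'vendor:')
--     tokens = []
--     for raw in content.strip().split('\n'):
--         line = raw.strip()
--         if not line:
--             continue
--         low = line.lower()
--         if low.startswith(BUYER):
--             tokens.append(('buyer', line.split(':', 1)[1].strip()))
--         elif low.startswith(SUPPLIER):
--             tokens.append(('supplier', line.split(':', 1)[1].strip()))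
--         else:
--             tokens.append((None, line))
--
--     transcript = []
--     open_entry = None  # (role, [message pieces]) or None
--     for role, text in tokens:
--         if role is None:
--             if open_entry is None:
--                 open_entry = ('buyer', [text])  # default to buyer
--             else:
--                 open_entry[1].append(text)
--         else:
--             if open_entry is not None:
--                 transcript.append({"role": open_entry[0],
--                                    "message": ' '.join(open_entry[1])})
--             open_entry = (role, [text])
--     if open_entry is not None:
--         transcript.append({"role": open_entry[0],
--                            "message": ' '.join(open_entry[1])})
--     return transcript
-- ===== Notes on version B (the rewrite author's own statement) =====
-- stated objective: alternative
-- what changed: Replaced the single loop with interleaved flush/role/message state variables by a two-pass design: tokenize lines into (role|None, text) tokens, then fold the tokens with one Option-typed open-entry accumulator.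
import Mathlib
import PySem

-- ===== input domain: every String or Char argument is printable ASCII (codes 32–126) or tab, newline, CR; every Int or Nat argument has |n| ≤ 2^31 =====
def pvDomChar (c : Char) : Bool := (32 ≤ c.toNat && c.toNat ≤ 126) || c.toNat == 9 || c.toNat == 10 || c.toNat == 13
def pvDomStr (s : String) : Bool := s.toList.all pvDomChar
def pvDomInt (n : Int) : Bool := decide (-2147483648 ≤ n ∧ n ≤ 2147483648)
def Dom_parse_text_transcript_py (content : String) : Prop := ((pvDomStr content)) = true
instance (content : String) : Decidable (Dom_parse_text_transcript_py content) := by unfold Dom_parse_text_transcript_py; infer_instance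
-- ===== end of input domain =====

-- B re-decomposes A's single stateful loop into tokenize-then-fold (objective: alternative decomposition, same cost).

-- ===== PORT A =====
-- loop body of A: state = (transcript, current_role, current_message);
-- "if current_role" (string truthiness) is ported as role = some r with r ≠ ""
def pvAStep (st : List (List (String × String)) × Option String × List String) (raw : String) :
    List (List (String × String)) × Option String × List String :=
  match st with
  | (tr, role, msg) =>
    let line := PySem.Str.strip raw
    if PySem.Str.len line = 0 then (tr, role, msg)   -- "if not line: continue"
    else
      let low := PySem.Str.lower line
      if PySem.Str.startswith low "buyer:" || PySem.Str.startswith low "user:" ||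
         PySem.Str.startswith low "customer:" then
        let tr' := match role with
          | some r => if r ≠ "" ∧ msg ≠ [] then
                        tr ++ [[("role", r), ("message", PySem.Str.join " " msg)]]
                      else tr
          | none => tr
        -- line.split(':',1)[1]: the startswith guarantee means ':' occurs, so pyGet? is some here
        (tr', some "buyer",
          [PySem.Str.strip ((PySem.List.pyGet? ((PySem.Str.splitMax? line ":" 1).getD []) 1).getD "")])
      else if PySem.Str.startswith low "supplier:" || PySem.Str.startswith low "seller:" ||
              PySem.Str.startswith low "vendor:" then
        let tr' := match role with
          | some r => if r ≠ "" ∧ msg ≠ [] then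
                        tr ++ [[("role", r), ("message", PySem.Str.join " " msg)]]
                      else tr
          | none => tr
        (tr', some "supplier",
          [PySem.Str.strip ((PySem.List.pyGet? ((PySem.Str.splitMax? line ":" 1).getD []) 1).getD "")])
      else
        if msg ≠ [] then (tr, role, msg ++ [line])
        else (tr, some "buyer", [line])

-- A's trailing "add the last message"
def pvAFinish (st : List (List (String × String)) × Option String × List String) :
    List (List (String × String)) :=
  match st with
  | (tr, some r, msg) =>
      if r ≠ "" ∧ msg ≠ [] then
        tr ++ [[("role", r), ("message", PySem.Str.join " " msg)]]
      else tr
  | (tr, none, _) => tr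

def parse_text_transcript_py (content : String) : List (List (String × String)) :=
  -- split? is none only for an empty separator, so getD is exact here
  let lines := (PySem.Str.split? (PySem.Str.strip content) "\n").getD []
  pvAFinish (lines.foldl pvAStep ([], none, []))

-- ===== PORT B =====
-- B pass 1: one token per non-empty stripped line — (some role, text-after-colon) or (none, whole line)
def pvAfterColon (line : String) : String :=
  -- line.split(':',1)[1].strip(); callers guarantee ':' occurs, so pyGet? is some here
  PySem.Str.strip ((PySem.List.pyGet? ((PySem.Str.splitMax? line ":" 1).getD []) 1).getD "")

def pvTok (raw : String) : Option (Option String × String) :=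
  let line := PySem.Str.strip raw
  if PySem.Str.len line = 0 then none
  else
    let low := PySem.Str.lower line
    if PySem.Str.startswith low "buyer:" || PySem.Str.startswith low "user:" ||
       PySem.Str.startswith low "customer:" then some (some "buyer", pvAfterColon line)
    else if PySem.Str.startswith low "supplier:" || PySem.Str.startswith low "seller:" ||
            PySem.Str.startswith low "vendor:" then some (some "supplier", pvAfterColon line)
    else some (none, line)

-- B pass 2: fold tokens; state = (transcript, open entry)
def pvBStep (st : List (List (String × String)) × Option (String × List String))
    (tok : Option String × String) :
    List (List (String × String)) × Option (String × List String) :=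
  match tok with
  | (none, text) =>
    match st.2 with
    | none => (st.1, some ("buyer", [text]))          -- default to buyer
    | some (r, ms) => (st.1, some (r, ms ++ [text]))
  | (some r, text) =>
    match st.2 with
    | none => (st.1, some (r, [text]))
    | some (r0, ms) =>
        (st.1 ++ [[("role", r0), ("message", PySem.Str.join " " ms)]], some (r, [text]))

def pvBFlush (st : List (List (String × String)) × Option (String × List String)) :
    List (List (String × String)) :=
  match st.2 with
  | none => st.1
  | some (r, ms) => st.1 ++ [[("role", r), ("message", PySem.Str.join " " ms)]]

def parse_text_transcript_py_alt (content : String) : List (List (String × String)) :=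
  -- split? is none only for an empty separator, so getD is exact here
  let tokens := (((PySem.Str.split? (PySem.Str.strip content) "\n").getD []).filterMap pvTok)
  pvBFlush (tokens.foldl pvBStep ([], none))

-- ===== PRECONDITION & SPEC =====
def Spec_parse_text_transcript_py (content : String) (out : List (List (String × String))) : Prop := out = parse_text_transcript_py_alt content
instance (content : String) (out : List (List (String × String))) : Decidable (Spec_parse_text_transcript_py content out) := by unfold Spec_parse_text_transcript_py; infer_instance

-- ===== CLAIM (what is proved, stated in full; the proofs are below) =====
def Claim_equal_parse_text_transcript_py : Prop := ∀ (content : String), Dom_parse_text_transcript_py content → Spec_parse_text_transcript_py content (parse_text_transcript_py content)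

-- ===== LEMMAS AND PROOFS =====

-- A-state corresponding to a B open-entry
def pvProj (cur : Option (String × List String)) : Option String × List String :=
  (cur.map Prod.fst, ((cur.map Prod.snd).getD []))

-- the loop invariant: an open B entry always has a truthy role and a non-empty message list,
-- and then the two folds stay in lock-step
lemma pvMain (lines : List String) (tr : List (List (String × String)))
    (cur : Option (String × List String))
    (hinv : ∀ r ms, cur = some (r, ms) → r ≠ "" ∧ ms ≠ []) :
    pvAFinish (lines.foldl pvAStep (tr, pvProj cur)) =
    pvBFlush ((lines.filterMap pvTok).foldl pvBStep (tr, cur)) := by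
  induction lines generalizing tr cur with
  | nil =>
    cases cur with
    | none => simp only [List.foldl_nil, List.filterMap_nil, pvAFinish, pvBFlush, pvProj,
        Option.map_none, Option.getD_none]
    | some p =>
      obtain ⟨r, ms⟩ := p
      obtain ⟨h1, h2⟩ := hinv r ms rfl
      simp only [List.foldl_nil, List.filterMap_nil, pvAFinish, pvBFlush, pvProj,
        Option.map_some, Option.getD_some]
      rw [if_pos ⟨h1, h2⟩]
  | cons l ls ih =>
    simp only [List.foldl_cons, List.filterMap_cons]
    by_cases h0 : PySem.Str.len (PySem.Str.strip l) = 0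
    · have hA : pvAStep (tr, pvProj cur) l = (tr, pvProj cur) := by
        simp only [pvAStep]
        rw [if_pos h0]
      have hT : pvTok l = none := by
        simp only [pvTok]
        rw [if_pos h0]
      rw [hA, hT]
      exact ih tr cur hinv
    · by_cases hb : (PySem.Str.startswith (PySem.Str.lower (PySem.Str.strip l)) "buyer:" ||
          PySem.Str.startswith (PySem.Str.lower (PySem.Str.strip l)) "user:" ||
          PySem.Str.startswith (PySem.Str.lower (PySem.Str.strip l)) "customer:") = true
      · have hT : pvTok l = some (some "buyer", pvAfterColon (PySem.Str.strip l)) := by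
          simp only [pvTok]
          rw [if_neg h0, if_pos hb]
        rw [hT]
        cases cur with
        | none =>
          have hA : pvAStep (tr, pvProj none) l =
              (tr, pvProj (some ("buyer", [pvAfterColon (PySem.Str.strip l)]))) := by
            simp only [pvAStep, pvProj, pvAfterColon, Option.map_none, Option.getD_none,
              Option.map_some, Option.getD_some]
            rw [if_neg h0, if_pos hb]
          rw [hA]
          exact ih tr _ (by rintro r ms ⟨rfl, rfl⟩; exact ⟨by decide, by simp⟩)
        | some p =>
          obtain ⟨r, ms⟩ := p
          obtain ⟨h1, h2⟩ := hinv r ms rfl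
          have hA : pvAStep (tr, pvProj (some (r, ms))) l =
              (tr ++ [[("role", r), ("message", PySem.Str.join " " ms)]],
               pvProj (some ("buyer", [pvAfterColon (PySem.Str.strip l)]))) := by
            simp only [pvAStep, pvProj, pvAfterColon, Option.map_some, Option.getD_some]
            rw [if_neg h0, if_pos hb, if_pos ⟨h1, h2⟩]
          rw [hA]
          exact ih _ _ (by rintro r' ms' ⟨rfl, rfl⟩; exact ⟨by decide, by simp⟩)
      · by_cases hs : (PySem.Str.startswith (PySem.Str.lower (PySem.Str.strip l)) "supplier:" ||
            PySem.Str.startswith (PySem.Str.lower (PySem.Str.strip l)) "seller:" ||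
            PySem.Str.startswith (PySem.Str.lower (PySem.Str.strip l)) "vendor:") = true
        · have hT : pvTok l = some (some "supplier", pvAfterColon (PySem.Str.strip l)) := by
            simp only [pvTok]
            rw [if_neg h0, if_neg hb, if_pos hs]
          rw [hT]
          cases cur with
          | none =>
            have hA : pvAStep (tr, pvProj none) l =
                (tr, pvProj (some ("supplier", [pvAfterColon (PySem.Str.strip l)]))) := by
              simp only [pvAStep, pvProj, pvAfterColon, Option.map_none, Option.getD_none,
                Option.map_some, Option.getD_some]
              rw [if_neg h0, if_neg hb, if_pos hs]
            rw [hA]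
            exact ih tr _ (by rintro r ms ⟨rfl, rfl⟩; exact ⟨by decide, by simp⟩)
          | some p =>
            obtain ⟨r, ms⟩ := p
            obtain ⟨h1, h2⟩ := hinv r ms rfl
            have hA : pvAStep (tr, pvProj (some (r, ms))) l =
                (tr ++ [[("role", r), ("message", PySem.Str.join " " ms)]],
                 pvProj (some ("supplier", [pvAfterColon (PySem.Str.strip l)]))) := by
              simp only [pvAStep, pvProj, pvAfterColon, Option.map_some, Option.getD_some]
              rw [if_neg h0, if_neg hb, if_pos hs, if_pos ⟨h1, h2⟩]
            rw [hA]
            exact ih _ _ (by rintro r' ms' ⟨rfl, rfl⟩; exact ⟨by decide, by simp⟩)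
        · have hT : pvTok l = some (none, PySem.Str.strip l) := by
            simp only [pvTok]
            rw [if_neg h0, if_neg hb, if_neg hs]
          rw [hT]
          cases cur with
          | none =>
            have hA : pvAStep (tr, pvProj none) l =
                (tr, pvProj (some ("buyer", [PySem.Str.strip l]))) := by
              simp only [pvAStep, pvProj, Option.map_none, Option.getD_none,
                Option.map_some, Option.getD_some]
              rw [if_neg h0, if_neg hb, if_neg hs, if_neg (by simp)]
            rw [hA]
            exact ih tr _ (by rintro r ms ⟨rfl, rfl⟩; exact ⟨by decide, by simp⟩)
          | some p =>
            obtain ⟨r, ms⟩ := p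
            obtain ⟨h1, h2⟩ := hinv r ms rfl
            have hA : pvAStep (tr, pvProj (some (r, ms))) l =
                (tr, pvProj (some (r, ms ++ [PySem.Str.strip l]))) := by
              simp only [pvAStep, pvProj, Option.map_some, Option.getD_some]
              rw [if_neg h0, if_neg hb, if_neg hs, if_pos h2]
            rw [hA]
            exact ih _ _ (by
              rintro r' ms' h
              injection h with h
              injection h with ha hbb
              subst ha; subst hbb
              exact ⟨h1, by simp⟩)

-- ===== VERDICT (by name: the statement is the Claim_ definition above) =====
theorem parse_text_transcript_py_spec : Claim_equal_parse_text_transcript_py := by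
  intro content _
  unfold Spec_parse_text_transcript_py parse_text_transcript_py parse_text_transcript_py_alt
  exact pvMain _ [] none (by rintro r ms ⟨⟩)
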